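-- pv_equiv track=rewrite | github.com/metonline/mgbric | calculate_dd_analysis.py | hand_to_dds_format
-- ===== SOURCE A (Python) =====
-- from typing import Dict, Tuple
--
-- def hand_to_dds_format(north: Dict, south: Dict, east: Dict, west: Dict, trump: str, first_hand: str) -> Tuple[str, str]:
--     """
--     Convert bridge hands to DDS format
--
--     DDS format: 52-char string representing cards 0-51
--     Each card position represents A-K-Q-J-T-9-8-7-6-5-4-3-2 for each suit
--     """
--     # Card encoding: suits are ordered S, H, D, C (even indexes) and players N, E, S, W (odd indexes at higher level)
--
--     hands = {'N': north, 'S': south, 'E': east, 'W': west}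
--
--     # Simple conversion: encode which player holds which card
--     pbn = ""
--     for suit in ['S', 'H', 'D', 'C']:
--         for rank in ['A', 'K', 'Q', 'J', 'T', '9', '8', '7', '6', '5', '4', '3', '2']:
--             card = rank + suit
--             # Find which hand has this card
--             found = False
--             for player, hand in hands.items():
--                 hand_str = hand.get(suit, "")
--                 if rank in hand_str:
--                     pbn += player
--                     found = True
--                     break
--             if not found:
--                 pbn += "?"
--
--     return pbn, first_hand
-- ===== SOURCE B (Python) =====
-- def hand_to_dds_format(north, south, east, west, trump, first_hand):
--     # Alternative: build a card -> owner table once (first player in N,S,E,W order wins),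
--     # then emit the 52 cards by direct lookup.
--     table = {}
--     for player, hand in (('N', north), ('S', south), ('E', east), ('W', west)):
--         for suit in 'SHDC':
--             for ch in hand.get(suit, ""):
--                 table.setdefault(ch + suit, player)
--     pbn = "".join(table.get(rank + suit, "?")
--                   for suit in 'SHDC' for rank in 'AKQJT98765432')
--     return pbn, first_hand
-- ===== Notes on version B (the rewrite author's own statement) =====
-- stated objective: alternative
-- what changed: Replaces the per-card scan over all four players' suit strings with a single table-population pass (card -> first owning player via dict.setdefault) followed by 52 direct lookups.
import Mathlib
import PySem

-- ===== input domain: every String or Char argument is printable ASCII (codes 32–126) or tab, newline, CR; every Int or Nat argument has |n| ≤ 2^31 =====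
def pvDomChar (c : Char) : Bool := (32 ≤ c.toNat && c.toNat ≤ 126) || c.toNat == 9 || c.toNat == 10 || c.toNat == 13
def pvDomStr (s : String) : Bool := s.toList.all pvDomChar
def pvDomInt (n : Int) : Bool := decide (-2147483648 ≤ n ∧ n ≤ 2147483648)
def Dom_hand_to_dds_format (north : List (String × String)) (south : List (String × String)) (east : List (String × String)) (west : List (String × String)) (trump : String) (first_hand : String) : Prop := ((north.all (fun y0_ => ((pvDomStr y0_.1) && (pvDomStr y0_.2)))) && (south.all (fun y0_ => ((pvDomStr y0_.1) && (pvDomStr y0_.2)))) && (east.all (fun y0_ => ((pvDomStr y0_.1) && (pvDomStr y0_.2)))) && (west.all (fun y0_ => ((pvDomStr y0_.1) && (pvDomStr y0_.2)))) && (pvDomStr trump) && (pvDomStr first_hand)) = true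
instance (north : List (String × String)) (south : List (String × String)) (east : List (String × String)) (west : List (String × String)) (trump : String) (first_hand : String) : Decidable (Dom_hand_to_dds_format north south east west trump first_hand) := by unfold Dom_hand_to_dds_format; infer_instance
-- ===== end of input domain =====

-- B replaces A's per-card scan over all four hands by one setdefault table-population
-- pass followed by 52 direct lookups (objective: alternative algorithm, same measured cost).

-- hand.get(suit, "") — shared accessor used by both Pythons verbatim
def pvSuitStr (hand : List (String × String)) (suit : Char) : String :=
  (PySem.Dict.mk hand).getD (String.ofList [suit]) ""

def pvSuits : List Char := ['S', 'H', 'D', 'C']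
def pvRanks : List Char := ['A', 'K', 'Q', 'J', 'T', '9', '8', '7', '6', '5', '4', '3', '2']

-- ===== PORT A =====
-- the inner player loop with found/break: first player whose suit string contains rank, else "?"
def pvFindOwner (hands : List (String × List (String × String))) (suit : Char) (rank : Char) : String :=
  match hands with
  | [] => "?"
  | (player, hand) :: rest =>
    if PySem.Str.isIn (String.ofList [rank]) (pvSuitStr hand suit) then player
    else pvFindOwner rest suit rank

def hand_to_dds_format (north : List (String × String)) (south : List (String × String)) (east : List (String × String)) (west : List (String × String)) (trump : String) (first_hand : String) : String × String :=
  let hands := [("N", north), ("S", south), ("E", east), ("W", west)]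
  let pbn := pvSuits.foldl (fun acc suit =>
    pvRanks.foldl (fun acc rank => acc ++ pvFindOwner hands suit rank) acc) ""
  (pbn, first_hand)

-- ===== PORT B =====
-- table.setdefault(ch + suit, player) over one player's four suit strings
def pvAddHand (d : PySem.Dict String String) (player : String) (hand : List (String × String)) : PySem.Dict String String :=
  pvSuits.foldl (fun d suit =>
    (pvSuitStr hand suit).toList.foldl
      (fun d ch => d.setdefault (String.ofList [ch, suit]) player) d) d

def hand_to_dds_format_alt (north : List (String × String)) (south : List (String × String)) (east : List (String × String)) (west : List (String × String)) (trump : String) (first_hand : String) : String × String :=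
  let table := [("N", north), ("S", south), ("E", east), ("W", west)].foldl
    (fun d ph => pvAddHand d ph.1 ph.2) PySem.Dict.empty
  let pbn := PySem.Str.join "" (pvSuits.flatMap (fun suit =>
    pvRanks.map (fun rank => table.getD (String.ofList [rank, suit]) "?")))
  (pbn, first_hand)

-- ===== PRECONDITION & SPEC =====
def Spec_hand_to_dds_format (north : List (String × String)) (south : List (String × String)) (east : List (String × String)) (west : List (String × String)) (trump : String) (first_hand : String) (out : String × String) : Prop := out = hand_to_dds_format_alt north south east west trump first_hand
instance (north : List (String × String)) (south : List (String × String)) (east : List (String × String)) (west : List (String × String)) (trump : String) (first_hand : String) (out : String × String) : Decidable (Spec_hand_to_dds_format north south east west trump first_hand out) := by unfold Spec_hand_to_dds_format; infer_instance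

-- ===== CLAIM (what is proved, stated in full; the proofs are below) =====
def Claim_equal_hand_to_dds_format : Prop := ∀ (north : List (String × String)) (south : List (String × String)) (east : List (String × String)) (west : List (String × String)) (trump : String) (first_hand : String), Dom_hand_to_dds_format north south east west trump first_hand → Spec_hand_to_dds_format north south east west trump first_hand (hand_to_dds_format north south east west trump first_hand)

-- ===== LEMMAS AND PROOFS =====

theorem pv_ofList_pair_inj (a b c d : Char) :
    String.ofList [a, b] = String.ofList [c, d] ↔ a = c ∧ b = d := by
  rw [String.ofList_inj]; simp

-- a setdefault loop over a key list: lookups see the old binding first, then the loop's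
theorem pv_get_foldl_setdefault (ks : List String) (p : String) (d : PySem.Dict String String) (k : String) :
    (ks.foldl (fun d k' => d.setdefault k' p) d).get? k =
      (d.get? k).or (if k ∈ ks then some p else none) := by
  induction ks generalizing d with
  | nil => simp
  | cons k0 rest ih =>
    simp only [List.foldl_cons, ih]
    by_cases hk : k = k0
    · subst hk
      rw [PySem.Dict.get?_setdefault_self]
      cases d.get? k <;> simp
    · rw [PySem.Dict.get?_setdefault_of_ne _ _ hk]
      simp [hk]

theorem pv_mem_pairkeys (cs : List Char) (r s s' : Char) :
    (String.ofList [r, s]) ∈ cs.map (fun ch => String.ofList [ch, s']) ↔ s' = s ∧ r ∈ cs := by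
  simp only [List.mem_map, pv_ofList_pair_inj]
  constructor
  · rintro ⟨ch, hch, rfl, rfl⟩; exact ⟨rfl, hch⟩
  · rintro ⟨rfl, hr⟩; exact ⟨r, hr, rfl, rfl⟩

-- one player's pass: for a two-char key [r, s] with s ∈ pvSuits, it claims the key iff r
-- occurs in that player's suit-s string
theorem pv_get_addHand (d : PySem.Dict String String) (p : String) (h : List (String × String))
    (r s : Char) (hs : s ∈ pvSuits) :
    (pvAddHand d p h).get? (String.ofList [r, s]) =
      (d.get? (String.ofList [r, s])).or
        (if r ∈ (pvSuitStr h s).toList then some p else none) := by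
  have key : ∀ (s' : Char) (d : PySem.Dict String String),
      (((pvSuitStr h s').toList.foldl (fun d ch => d.setdefault (String.ofList [ch, s']) p) d).get? (String.ofList [r, s]))
        = (d.get? (String.ofList [r, s])).or (if s' = s ∧ r ∈ (pvSuitStr h s').toList then some p else none) := by
    intro s' d
    have hm := List.foldl_map (f := fun ch => String.ofList [ch, s'])
      (g := fun (d : PySem.Dict String String) k' => d.setdefault k' p)
      (l := (pvSuitStr h s').toList) (init := d)
    rw [← hm, pv_get_foldl_setdefault]
    exact congrArg ((d.get? (String.ofList [r, s])).or) (if_congr (pv_mem_pairkeys _ r s s') rfl rfl)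
  fin_cases hs <;>
    simp only [pvAddHand, pvSuits, List.foldl_cons, List.foldl_nil] <;>
    rw [key, key, key, key] <;>
    simp

theorem pv_isIn_char (r : Char) (str : String) :
    PySem.Str.isIn (String.ofList [r]) str = decide (r ∈ str.toList) := by
  have hi := PySem.Str.isIn_iff_infix (String.ofList [r]) str
  simp only [String.toList_ofList, List.singleton_infix_iff] at hi
  cases hb : PySem.Str.isIn (String.ofList [r]) str
  · have hn : ¬ r ∈ str.toList := fun hm => by rw [hi.mpr hm] at hb; cases hb
    simp [hn]
  · simp [hi.mp hb]

-- the four-player or-chain read back with getD "?" is exactly A's first-match scan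
theorem pv_owner_eq (north south east west : List (String × String)) (r s : Char) (hs : s ∈ pvSuits) :
    pvFindOwner [("N", north), ("S", south), ("E", east), ("W", west)] s r =
      (([("N", north), ("S", south), ("E", east), ("W", west)].foldl
        (fun d ph => pvAddHand d ph.1 ph.2) PySem.Dict.empty).getD (String.ofList [r, s]) "?") := by
  simp only [List.foldl_cons, List.foldl_nil]
  rw [PySem.Dict.getD_eq_get?_getD,
      pv_get_addHand _ _ _ _ _ hs, pv_get_addHand _ _ _ _ _ hs,
      pv_get_addHand _ _ _ _ _ hs, pv_get_addHand _ _ _ _ _ hs,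
      PySem.Dict.get?_empty]
  simp only [pvFindOwner, pv_isIn_char]
  by_cases h1 : r ∈ (pvSuitStr north s).toList <;>
    by_cases h2 : r ∈ (pvSuitStr south s).toList <;>
      by_cases h3 : r ∈ (pvSuitStr east s).toList <;>
        by_cases h4 : r ∈ (pvSuitStr west s).toList <;>
          simp [h1, h2, h3, h4, Option.or]

-- left fold by ++ from "" is join with the empty separator
theorem pv_foldl_eq_join (l : List String) : l.foldl (· ++ ·) "" = PySem.Str.join "" l := by
  have tl : ∀ (l : List String) (acc : String),
      (l.foldl (· ++ ·) acc).toList = acc.toList ++ (l.map String.toList).flatten := by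
    intro l
    induction l with
    | nil => intro acc; simp
    | cons h t ih => intro acc; simp [ih]
  have jn : ∀ (cs : List (List Char)), PySem.Chars.join [] cs = cs.flatten := by
    intro cs
    induction cs with
    | nil => simp [PySem.Chars.join, List.intercalate]
    | cons h t ih =>
      cases t <;> simp_all [PySem.Chars.join, List.intercalate, List.intersperse]
  apply String.toList_inj.mp
  rw [tl, PySem.Str.toList_join]
  simp [jn]

-- ===== VERDICT (by name: the statement is the Claim_ definition above) =====
theorem hand_to_dds_format_spec : Claim_equal_hand_to_dds_format := by
  intro north south east west trump first_hand _
  unfold Spec_hand_to_dds_format hand_to_dds_format hand_to_dds_format_alt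
  refine Prod.ext ?_ rfl
  show pvSuits.foldl (fun acc suit => pvRanks.foldl (fun acc rank =>
      acc ++ pvFindOwner [("N", north), ("S", south), ("E", east), ("W", west)] suit rank) acc) "" = _
  have step : ∀ suit ∈ pvSuits, ∀ rank,
      pvFindOwner [("N", north), ("S", south), ("E", east), ("W", west)] suit rank =
        ([("N", north), ("S", south), ("E", east), ("W", west)].foldl
          (fun d ph => pvAddHand d ph.1 ph.2) PySem.Dict.empty).getD (String.ofList [rank, suit]) "?" :=
    fun suit hs rank => pv_owner_eq north south east west rank suit hs
  rw [show (pvSuits.foldl (fun acc suit => pvRanks.foldl (fun acc rank =>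
        acc ++ pvFindOwner [("N", north), ("S", south), ("E", east), ("W", west)] suit rank) acc) "")
      = (pvSuits.flatMap (fun suit => pvRanks.map (fun rank =>
          pvFindOwner [("N", north), ("S", south), ("E", east), ("W", west)] suit rank))).foldl (· ++ ·) "" by
    simp only [List.flatMap_def, List.foldl_flatten, List.foldl_map]]
  rw [pv_foldl_eq_join]
  congr 1
  simp only [List.flatMap_def]
  exact congrArg List.flatten (List.map_congr_left (fun suit hs =>
    List.map_congr_left (fun rank _ => step suit hs rank)))
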